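-- pv_equiv track=rewrite | github.com/mshea/useful_scripts | Markdown Cleanup and Markdown to EPUB/clean_markdown.py | find_common_suffix
-- ===== SOURCE A (Python) =====
-- def find_common_suffix(filenames):
--     """Find common suffix in a list of filenames."""
--     if not filenames:
--         return ""
--
--     # Remove .md extension for analysis
--     names = [f.replace('.md', '') for f in filenames]
--
--     if not names:
--         return ""
--
--     # Find the common suffix by comparing characters from the end
--     suffix = names[0]
--
--     for name in names[1:]:
--         # Find where the current suffix and this name diverge (from the end)
--         i = 1
--         while i <= len(suffix) and i <= len(name) and suffix[-i] == name[-i]: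
--             i += 1
--         suffix = suffix[-(i-1):] if i > 1 else ""
--
--         if not suffix:
--             break
--
--     # Clean up the suffix to start at a word boundary (before " - ")
--     if ' - ' in suffix:
--         # Find the first occurrence of ' - ' in the suffix
--         first_separator = suffix.find(' - ')
--         if first_separator >= 0:
--             suffix = suffix[first_separator:]  # Include the ' - '
--
--     return suffix if len(suffix) > 3 else ""
-- ===== SOURCE B (Python) =====
-- def find_common_suffix(filenames):
--     """Find common suffix in a list of filenames."""
--     if not filenames:
--         return ""
--
--     # Remove .md extension for analysis
--     names = [f.replace('.md', '') for f in filenames]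
--
--     if not names:
--         return ""
--
--     # Longest common prefix of the reversed names, column by column
--     chars = []
--     for col in zip(*[n[::-1] for n in names]):
--         if all(c == col[0] for c in col):
--             chars.append(col[0])
--         else:
--             break
--     suffix = ''.join(chars)[::-1]
--
--     # Clean up the suffix to start at a word boundary (before " - ")
--     if ' - ' in suffix:
--         first_separator = suffix.find(' - ')
--         if first_separator >= 0:
--             suffix = suffix[first_separator:]
--
--     return suffix if len(suffix) > 3 else ""
-- ===== Notes on version B (the rewrite author's own statement) =====
-- stated objective: alternative
-- what changed: Replaced the pairwise suffix-shrinking loop (a while loop with negative indexing and slicing per name) by a single column-by-column scan over the reversed names (longest common prefix of the reversals, transposed zip style).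
import Mathlib
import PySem

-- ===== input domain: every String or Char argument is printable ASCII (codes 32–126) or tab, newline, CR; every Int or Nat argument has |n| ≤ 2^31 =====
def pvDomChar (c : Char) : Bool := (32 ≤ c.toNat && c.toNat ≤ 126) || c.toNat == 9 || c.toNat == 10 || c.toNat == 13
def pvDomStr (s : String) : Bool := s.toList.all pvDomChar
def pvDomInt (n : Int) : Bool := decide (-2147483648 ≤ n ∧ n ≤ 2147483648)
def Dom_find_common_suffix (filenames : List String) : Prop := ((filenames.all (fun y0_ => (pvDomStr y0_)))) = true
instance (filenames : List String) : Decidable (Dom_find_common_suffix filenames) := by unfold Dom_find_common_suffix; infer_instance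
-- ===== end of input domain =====

-- B replaces A's pairwise suffix-shrinking loop by one column-by-column scan over the
-- reversed names (longest common prefix of the reversals); same cost, different algorithm.

-- ===== PORT A =====

-- the ' - ' boundary cleanup and the final len > 3 check, identical lines in both Pythons (shared helper)
def pvTailClean (suffix : List Char) : List Char :=
  if PySem.Chars.isIn " - ".toList suffix then
    let first_separator := PySem.Chars.find suffix " - ".toList
    if first_separator ≥ 0 then PySem.List.slice suffix (some first_separator) none else suffix
  else suffix

-- A's inner while loop: i += 1 while i <= len(suffix) and i <= len(name) and suffix[-i] == name[-i]
def pvWhileA (s n : List Char) (i : Nat) : Nat :=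
  if 1 ≤ i ∧ i ≤ s.length ∧ i ≤ n.length ∧
      PySem.List.pyGet? s (-(i : Int)) = PySem.List.pyGet? n (-(i : Int)) then
    pvWhileA s n (i + 1)
  else i
termination_by s.length + 1 - i
decreasing_by omega

-- one body of A's for loop: suffix = suffix[-(i-1):] if i > 1 else ""
def pvShrinkA (s n : List Char) : List Char :=
  let i := pvWhileA s n 1
  if i > 1 then PySem.List.slice s (some (-((i : Int) - 1))) none else []

-- A's for loop over names[1:], with the 'if not suffix: break'
def pvLoopA : List Char → List (List Char) → List Char
  | suf, [] => suf
  | suf, n :: ns =>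
    let suf' := pvShrinkA suf n
    if suf' = [] then suf' else pvLoopA suf' ns

def find_common_suffix (filenames : List String) : String :=
  if filenames = [] then "" else
  let names := filenames.map (fun f => PySem.Chars.replace f.toList ".md".toList [])
  if names = [] then "" else
  match names with
  | [] => ""
  | n0 :: rest =>
    let suffix := pvLoopA n0 rest
    let suffix := pvTailClean suffix
    if suffix.length > 3 then String.ofList suffix else ""

-- ===== PORT B =====

-- the for-col-in-zip(*revnames) loop: append col[0] while the whole column agrees, else break
-- (zip stops at the shortest list: the head? test fails as soon as any list is exhausted)
def pvColLCP : List Char → List (List Char) → List Char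
  | [], _ => []
  | h :: t, rest =>
    if rest.all (fun r => r.head? == some h) then h :: pvColLCP t (rest.map List.tail)
    else []

def find_common_suffix_alt (filenames : List String) : String :=
  if filenames = [] then "" else
  let names := filenames.map (fun f => PySem.Chars.replace f.toList ".md".toList [])
  if names = [] then "" else
  match names.map List.reverse with
  | [] => ""
  | r0 :: rs =>
    let suffix := (pvColLCP r0 rs).reverse
    let suffix := pvTailClean suffix
    if suffix.length > 3 then String.ofList suffix else ""

-- ===== PRECONDITION & SPEC =====
def Spec_find_common_suffix (filenames : List String) (out : String) : Prop := out = find_common_suffix_alt filenames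
instance (filenames : List String) (out : String) : Decidable (Spec_find_common_suffix filenames out) := by unfold Spec_find_common_suffix; infer_instance

-- ===== CLAIM (what is proved, stated in full; the proofs are below) =====
def Claim_equal_find_common_suffix : Prop := ∀ (filenames : List String), Dom_find_common_suffix filenames → Spec_find_common_suffix filenames (find_common_suffix filenames)

-- ===== LEMMAS AND PROOFS =====

-- proof-side longest common prefix
def plcp : List Char → List Char → List Char
  | a :: as, b :: bs => if a = b then a :: plcp as bs else []
  | _, _ => []

theorem plcp_nil_left (b : List Char) : plcp [] b = [] := by cases b <;> rfl

theorem plcp_prefix (a b : List Char) : plcp a b = a.take (plcp a b).length := by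
  induction a generalizing b with
  | nil => simp [plcp_nil_left]
  | cons x xs ih =>
    cases b with
    | nil => rfl
    | cons y ys =>
      by_cases h : x = y
      · simp [plcp, h]; exact ih ys
      · simp [plcp, h]

theorem plcp_length_le (a b : List Char) :
    (plcp a b).length ≤ a.length ∧ (plcp a b).length ≤ b.length := by
  induction a generalizing b with
  | nil => simp [plcp_nil_left]
  | cons x xs ih =>
    cases b with
    | nil => simp [plcp]
    | cons y ys =>
      by_cases h : x = y
      · simp only [plcp, if_pos h, List.length_cons]
        have := ih ys; omega
      · simp [plcp, h]

theorem foldl_plcp_nil (l : List (List Char)) : l.foldl plcp [] = [] := by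
  induction l with
  | nil => rfl
  | cons x xs ih => simpa [plcp_nil_left] using ih

-- while-loop characterisation: pvWhileA counts matched chars from the end, plus one
theorem pvWhileA_eq (s n : List Char) (i : Nat) (hi : 1 ≤ i) :
    pvWhileA s n i = i + (plcp (s.reverse.drop (i - 1)) (n.reverse.drop (i - 1))).length := by
  rw [pvWhileA]
  by_cases hc : 1 ≤ i ∧ i ≤ s.length ∧ i ≤ n.length ∧
      PySem.List.pyGet? s (-(i : Int)) = PySem.List.pyGet? n (-(i : Int))
  · obtain ⟨-, hs, hn, hg⟩ := hc
    rw [if_pos ⟨hi, hs, hn, hg⟩]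
    rw [PySem.List.pyGet?_neg_natCast s i (by omega) hs,
        PySem.List.pyGet?_neg_natCast n i (by omega) hn] at hg
    have hs' : i - 1 < s.reverse.length := by simp only [List.length_reverse]; omega
    have hn' : i - 1 < n.reverse.length := by simp only [List.length_reverse]; omega
    have hds : s.reverse.drop (i - 1) = s.reverse[i-1] :: s.reverse.drop i := by
      rw [List.drop_eq_getElem_cons hs', Nat.sub_add_cancel hi]
    have hdn : n.reverse.drop (i - 1) = n.reverse[i-1] :: n.reverse.drop i := by
      rw [List.drop_eq_getElem_cons hn', Nat.sub_add_cancel hi]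
    have hhe : s.reverse[i-1] = n.reverse[i-1] := by
      have h1 : s.reverse[i-1] = s[s.length - i] := by
        rw [List.getElem_reverse]; congr 1; omega
      have h2 : n.reverse[i-1] = n[n.length - i] := by
        rw [List.getElem_reverse]; congr 1; omega
      rw [h1, h2]
      have := hg
      rw [List.getElem?_eq_getElem (by omega), List.getElem?_eq_getElem (by omega)] at this
      exact Option.some.inj this
    rw [pvWhileA_eq s n (i + 1) (by omega)]
    rw [hds, hdn, plcp, if_pos hhe]
    simp only [List.length_cons]
    have : i + 1 - 1 = i := by omega
    rw [this]; omega
  · rw [if_neg hc]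
    have h0 : (plcp (s.reverse.drop (i - 1)) (n.reverse.drop (i - 1))).length = 0 := by
      rcases Decidable.not_and_iff_or_not.mp hc with h | h
      · omega
      rcases Decidable.not_and_iff_or_not.mp h with h | h
      · have : s.reverse.drop (i - 1) = [] := by
          apply List.drop_eq_nil_of_le; simp; omega
        rw [this, plcp_nil_left]; rfl
      rcases Decidable.not_and_iff_or_not.mp h with h | h
      · have : n.reverse.drop (i - 1) = [] := by
          apply List.drop_eq_nil_of_le; simp; omega
        rw [this]; cases s.reverse.drop (i - 1) <;> rfl
      · -- chars differ (both indices in range, by the earlier cases? no: we only know the equality fails)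
        by_cases hs : i ≤ s.length
        · by_cases hn : i ≤ n.length
          · rw [PySem.List.pyGet?_neg_natCast s i (by omega) hs,
                PySem.List.pyGet?_neg_natCast n i (by omega) hn] at h
            have hs' : i - 1 < s.reverse.length := by simp only [List.length_reverse]; omega
            have hn' : i - 1 < n.reverse.length := by simp only [List.length_reverse]; omega
            rw [List.drop_eq_getElem_cons hs', List.drop_eq_getElem_cons hn']
            simp only [Nat.sub_add_cancel hi]
            have hne : s.reverse[i-1] ≠ n.reverse[i-1] := by
              intro he
              apply h
              rw [List.getElem?_eq_getElem (by omega), List.getElem?_eq_getElem (by omega)]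
              have h1 : s.reverse[i-1] = s[s.length - i] := by
                rw [List.getElem_reverse]; congr 1; omega
              have h2 : n.reverse[i-1] = n[n.length - i] := by
                rw [List.getElem_reverse]; congr 1; omega
              rw [← h1, ← h2, he]
            have hz : plcp (s.reverse[i-1] :: s.reverse.drop i)
                (n.reverse[i-1] :: n.reverse.drop i) = [] := by
              simp only [plcp]; rw [if_neg hne]
            rw [hz]; rfl
          · have : n.reverse.drop (i - 1) = [] := by
              apply List.drop_eq_nil_of_le; simp; omega
            rw [this]; cases s.reverse.drop (i - 1) <;> rfl
        · have : s.reverse.drop (i - 1) = [] := by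
            apply List.drop_eq_nil_of_le; simp; omega
          rw [this, plcp_nil_left]; rfl
    omega
termination_by s.length + 1 - i
decreasing_by omega

-- one shrink step equals a reversed binary lcp of the reversals
theorem pvShrinkA_eq (s n : List Char) :
    pvShrinkA s n = (plcp s.reverse n.reverse).reverse := by
  unfold pvShrinkA
  rw [pvWhileA_eq s n 1 le_rfl]
  simp only [Nat.sub_self, List.drop_zero]
  set m := (plcp s.reverse n.reverse).length with hm
  by_cases h0 : m = 0
  · have hnil : plcp s.reverse n.reverse = [] := by
      apply List.eq_nil_of_length_eq_zero; omega
    simp [h0, hnil]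
  · have hpos : 0 < m := Nat.pos_of_ne_zero h0
    rw [if_pos (by omega)]
    have hcast : ((1 + m : Nat) : Int) - 1 = (m : Int) := by push_cast; ring
    rw [hcast, PySem.List.slice_from_neg_natCast s m hpos]
    have hle : m ≤ s.length := by
      have := (plcp_length_le s.reverse n.reverse).1; simpa using this
    -- s.drop (s.length - m) = (s.reverse.take m).reverse
    have : s.drop (s.length - m) = (s.reverse.take m).reverse := by
      rw [List.reverse_take]; simp
    rw [this, hm, ← plcp_prefix]

-- A's loop is a fold of plcp over the reversals
theorem pvLoopA_eq (s : List Char) (ns : List (List Char)) :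
    pvLoopA s ns = ((ns.map List.reverse).foldl plcp s.reverse).reverse := by
  induction ns generalizing s with
  | nil => simp [pvLoopA]
  | cons n ns ih =>
    simp only [pvLoopA, List.map_cons, List.foldl_cons]
    rw [pvShrinkA_eq]
    by_cases h : (plcp s.reverse n.reverse).reverse = []
    · rw [if_pos h]
      have hnil : plcp s.reverse n.reverse = [] := by simpa using h
      rw [hnil, foldl_plcp_nil]
    · rw [if_neg h, ih]
      congr 2
      simp

-- B's column scan is the same fold
theorem pvColLCP_cons (a r : List Char) (rs : List (List Char)) :
    pvColLCP a (r :: rs) = pvColLCP (plcp a r) rs := by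
  induction a generalizing r rs with
  | nil => rw [plcp_nil_left]; rfl
  | cons h t ih =>
    have hL : pvColLCP (h :: t) (r :: rs) =
        if (r :: rs).all (fun l => l.head? == some h) then
          h :: pvColLCP t ((r :: rs).map List.tail) else [] := rfl
    cases r with
    | nil =>
      have hplcp : plcp (h :: t) [] = [] := rfl
      have hcond : ((([] : List Char) :: rs).all (fun l => l.head? == some h)) = false := by simp
      rw [hplcp, hL, hcond]
      rfl
    | cons x xs =>
      by_cases hx : x = h
      · subst hx
        have hplcp : plcp (x :: t) (x :: xs) = x :: plcp t xs := by simp [plcp]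
        have hR : pvColLCP (x :: plcp t xs) rs =
            if rs.all (fun l => l.head? == some x) then
              x :: pvColLCP (plcp t xs) (rs.map List.tail) else [] := rfl
        have hcond : (((x :: xs) :: rs).all (fun l => l.head? == some x))
            = rs.all (fun l => l.head? == some x) := by simp
        rw [hplcp, hL, hR, hcond]
        by_cases hall : rs.all (fun l => l.head? == some x) = true
        · rw [if_pos hall, if_pos hall]
          simp only [List.map_cons, List.tail_cons]
          rw [ih]
        · rw [if_neg hall, if_neg hall]
      · have hplcp : plcp (h :: t) (x :: xs) = [] := by
          simp [plcp, Ne.symm hx]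
        have hcond : (((x :: xs) :: rs).all (fun l => l.head? == some h)) = false := by
          simp [hx]
        rw [hplcp, hL, hcond]
        rfl

theorem pvColLCP_nil (a : List Char) : pvColLCP a [] = a := by
  induction a with
  | nil => rfl
  | cons h t ih => simp [pvColLCP, ih]

theorem pvColLCP_eq_foldl (a : List Char) (rs : List (List Char)) :
    pvColLCP a rs = rs.foldl plcp a := by
  induction rs generalizing a with
  | nil => exact pvColLCP_nil a
  | cons r rs ih => rw [pvColLCP_cons, List.foldl_cons, ih]

-- ===== VERDICT (by name: the statement is the Claim_ definition above) =====
theorem find_common_suffix_spec : Claim_equal_find_common_suffix := by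
  intro filenames _
  unfold Spec_find_common_suffix find_common_suffix find_common_suffix_alt
  by_cases h : filenames = []
  · simp [h]
  · rw [if_neg h, if_neg h]
    cases filenames with
    | nil => exact absurd rfl h
    | cons f fs =>
      simp only [List.map_cons]
      rw [pvLoopA_eq, pvColLCP_eq_foldl]
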